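-- pv_equiv track=rewrite | github.com/szigetvaris/VisualTester | api/tasks.py | extract_test_name
-- ===== SOURCE A (Python) =====
-- def extract_test_name(import_path):
--     path_parts = import_path.split("/")
--     cypress_indices = [i for i, part in enumerate(
--         path_parts) if part == "cypress"]
--     if len(cypress_indices) < 2:
--         return "Invalid path"
--
--     relevant_parts = path_parts[cypress_indices[1]:]
--     test_name = "/".join(relevant_parts)
--
--     return test_name
-- ===== SOURCE B (Python) =====
-- def extract_test_name(import_path):
--     seen = 0
--     acc = None
--     for part in import_path.split("/"):
--         if acc is not None:
--             acc += "/" + part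
--         elif part == "cypress":
--             seen += 1
--             if seen == 2:
--                 acc = part
--     return acc if acc is not None else "Invalid path"
-- ===== Notes on version B (the rewrite author's own statement) =====
-- stated objective: alternative
-- what changed: Replaces A's staged passes (collect all 'cypress' indices, length check, slice, join) with one streaming fold over the segments that counts occurrences and, from the second occurrence on, builds the result string incrementally with an accumulator; no index list, no slice and no final join exist in B.
import Mathlib
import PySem

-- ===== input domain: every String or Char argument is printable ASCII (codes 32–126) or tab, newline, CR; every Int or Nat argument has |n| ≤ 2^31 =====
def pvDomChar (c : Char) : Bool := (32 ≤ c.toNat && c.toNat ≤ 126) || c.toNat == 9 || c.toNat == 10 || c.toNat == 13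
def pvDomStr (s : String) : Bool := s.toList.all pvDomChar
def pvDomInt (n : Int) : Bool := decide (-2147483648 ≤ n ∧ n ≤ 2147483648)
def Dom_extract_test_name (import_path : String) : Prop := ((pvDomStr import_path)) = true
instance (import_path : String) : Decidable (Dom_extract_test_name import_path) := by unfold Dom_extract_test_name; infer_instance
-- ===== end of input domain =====

-- B replaces A's staged passes (collect all 'cypress' indices, slice, join) by one streaming
-- fold that counts occurrences and builds the result string incrementally (alternative).

-- ===== PORT A =====
def extract_test_name (import_path : String) : String :=
  let path_parts := (PySem.Str.split? import_path "/").getD []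
  let cypress_indices :=
    ((PySem.List.enumerate path_parts 0).filter (fun p => p.2 == "cypress")).map (·.1)
  if cypress_indices.length < 2 then "Invalid path"
  else
    let relevant_parts := PySem.List.slice path_parts (some (PySem.List.pyGetD cypress_indices 1 0)) none
    PySem.Str.join "/" relevant_parts

-- ===== PORT B =====
-- one step of B's loop over the segments: state = (seen, acc)
def etnStep (st : Nat × Option String) (part : String) : Nat × Option String :=
  match st.2 with
  | some acc => (st.1, some (acc ++ "/" ++ part))
  | none =>
    if part = "cypress" then
      if st.1 + 1 = 2 then (st.1 + 1, some part) else (st.1 + 1, none)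
    else st

def extract_test_name_alt (import_path : String) : String :=
  let st := ((PySem.Str.split? import_path "/").getD []).foldl etnStep (0, none)
  match st.2 with
  | some acc => acc
  | none => "Invalid path"

-- ===== PRECONDITION & SPEC =====
def Spec_extract_test_name (import_path : String) (out : String) : Prop := out = extract_test_name_alt import_path
instance (import_path : String) (out : String) : Decidable (Spec_extract_test_name import_path out) := by unfold Spec_extract_test_name; infer_instance

-- ===== CLAIM (what is proved, stated in full; the proofs are below) =====
def Claim_equal_extract_test_name : Prop := ∀ (import_path : String), Dom_extract_test_name import_path → Spec_extract_test_name import_path (extract_test_name import_path)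

-- ===== LEMMAS AND PROOFS =====

/-- The (Nat) positions of "cypress" in a segment list, in order. -/
def occN : List String → List Nat
  | [] => []
  | x :: xs => if x = "cypress" then 0 :: (occN xs).map (· + 1) else (occN xs).map (· + 1)

/-- A's body, restated on the segment list via occN. -/
def afun (l : List String) : String :=
  match occN l with
  | _ :: k2 :: _ => PySem.Str.join "/" (l.drop k2)
  | _ => "Invalid path"

/-- B's body, restated on the segment list. -/
def bfun (l : List String) : String :=
  match (l.foldl etnStep (0, none)).2 with
  | some acc => acc
  | none => "Invalid path"

theorem map_shift (ys : List Nat) (s : Int) :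
    ys.map (fun (k : Nat) => (s + 1) + (k : Int)) = (ys.map (· + 1)).map (fun (k : Nat) => s + (k : Int)) := by
  rw [List.map_map]
  exact List.map_congr_left (fun k _ => by simp only [Function.comp_apply]; push_cast; ring)

theorem occI_eq (l : List String) (s : Int) :
    ((PySem.List.enumerate l s).filter (fun p => p.2 == "cypress")).map (·.1)
      = (occN l).map (fun (k : Nat) => s + (k : Int)) := by
  induction l generalizing s with
  | nil => simp [occN, PySem.List.enumerate_nil]
  | cons x xs ih =>
    rw [PySem.List.enumerate_cons]
    by_cases hx : x = "cypress"
    · subst hx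
      rw [List.filter_cons_of_pos (by simp), List.map_cons, ih]
      have h1 : occN ("cypress" :: xs) = 0 :: (occN xs).map (· + 1) := by simp [occN]
      rw [h1, List.map_cons, ← map_shift]
      simp
    · rw [List.filter_cons_of_neg (by simp [hx]), ih]
      have h1 : occN (x :: xs) = (occN xs).map (· + 1) := by simp [occN, hx]
      rw [h1, ← map_shift]

theorem Abody_eq (l : List String) :
    (let path_parts := l;
     let cypress_indices :=
       ((PySem.List.enumerate path_parts 0).filter (fun p => p.2 == "cypress")).map (·.1);
     if cypress_indices.length < 2 then "Invalid path"
     else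
       let relevant_parts :=
         PySem.List.slice path_parts (some (PySem.List.pyGetD cypress_indices 1 0)) none
       PySem.Str.join "/" relevant_parts) = afun l := by
  dsimp only
  rw [occI_eq]
  unfold afun
  rcases h : occN l with _ | ⟨k1, _ | ⟨k2, rest⟩⟩
  · rw [if_pos (by simp)]
  · rw [if_pos (by simp)]
  · rw [if_neg (by simp)]
    have hg : PySem.List.pyGetD
        (List.map (fun (k : Nat) => (0 : Int) + (k : Int)) (k1 :: k2 :: rest)) 1 0
        = ((k2 : Nat) : Int) := by
      rw [PySem.List.pyGetD_ofNat']
      simp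
    rw [hg, PySem.List.slice_from_natCast]

theorem portA_eq (ip : String) :
    extract_test_name ip = afun ((PySem.Str.split? ip "/").getD []) :=
  Abody_eq ((PySem.Str.split? ip "/").getD [])

theorem portB_eq (ip : String) :
    extract_test_name_alt ip = bfun ((PySem.Str.split? ip "/").getD []) := rfl

/-- Joining by pulling the head into the accumulator (List Char level). -/
theorem chars_join_acc (sep : List Char) (ys : List (List Char)) (a b : List Char) :
    PySem.Chars.join sep ((a ++ sep ++ b) :: ys) = a ++ sep ++ PySem.Chars.join sep (b :: ys) := by
  cases ys with
  | nil => simp [PySem.Chars.join_singleton]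
  | cons c cs =>
    rw [PySem.Chars.join_cons_cons, PySem.Chars.join_cons_cons]
    simp

/-- B's accumulation loop computes exactly "/".join(x :: l). -/
theorem foldl_concat_eq_join (l : List String) (x : String) :
    l.foldl (fun a p => a ++ "/" ++ p) x = PySem.Str.join "/" (x :: l) := by
  induction l generalizing x with
  | nil =>
    apply String.ext
    simp [PySem.Str.toList_join, PySem.Chars.join_singleton]
  | cons y ys ih =>
    rw [List.foldl_cons, ih]
    apply String.ext
    simp only [PySem.Str.toList_join, List.map_cons]
    have := chars_join_acc "/".toList (ys.map String.toList) x.toList y.toList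
    simpa [PySem.Chars.join_cons_cons] using this

/-- Once acc is set, the fold only appends. -/
theorem foldl_step_some (l : List String) (n : Nat) (acc : String) :
    l.foldl etnStep (n, some acc) = (n, some (l.foldl (fun a p => a ++ "/" ++ p) acc)) := by
  induction l generalizing acc with
  | nil => rfl
  | cons y ys ih => simpa [etnStep] using ih (acc ++ "/" ++ y)

/-- The fold from state (1, none): result determined by the first occurrence. -/
theorem foldl_step_one (l : List String) :
    l.foldl etnStep (1, none) =
      match occN l with
      | [] => (1, none)
      | k :: _ => (2, some (PySem.Str.join "/" (l.drop k))) := by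
  induction l with
  | nil => rfl
  | cons x xs ih =>
    by_cases hx : x = "cypress"
    · subst hx
      have h1 : occN ("cypress" :: xs) = 0 :: (occN xs).map (· + 1) := by simp [occN]
      rw [List.foldl_cons, show etnStep (1, none) "cypress" = (2, some "cypress") from rfl,
        foldl_step_some, foldl_concat_eq_join, h1]
      simp
    · have h1 : occN (x :: xs) = (occN xs).map (· + 1) := by simp [occN, hx]
      rw [List.foldl_cons, show etnStep (1, none) x = (1, none) by simp [etnStep, hx], ih, h1]
      rcases h : occN xs with _ | ⟨k, rest⟩
      · rfl
      · simp
  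
/-- The fold from the initial state, characterised by the occurrence list. -/
theorem foldl_step_zero (l : List String) :
    l.foldl etnStep (0, none) =
      match occN l with
      | [] => (0, none)
      | [_] => (1, none)
      | _ :: k2 :: _ => (2, some (PySem.Str.join "/" (l.drop k2))) := by
  induction l with
  | nil => rfl
  | cons x xs ih =>
    by_cases hx : x = "cypress"
    · subst hx
      have h1 : occN ("cypress" :: xs) = 0 :: (occN xs).map (· + 1) := by simp [occN]
      rw [List.foldl_cons, show etnStep (0, none) "cypress" = (1, none) from rfl,
        foldl_step_one, h1]
      rcases h : occN xs with _ | ⟨k, rest⟩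
      · rfl
      · simp
    · have h1 : occN (x :: xs) = (occN xs).map (· + 1) := by simp [occN, hx]
      rw [List.foldl_cons, show etnStep (0, none) x = (0, none) by simp [etnStep, hx], ih, h1]
      rcases h : occN xs with _ | ⟨k1, _ | ⟨k2, rest⟩⟩
      · rfl
      · rfl
      · simp

theorem afun_eq_bfun (l : List String) : afun l = bfun l := by
  unfold afun bfun
  rw [foldl_step_zero]
  rcases h : occN l with _ | ⟨k1, _ | ⟨k2, rest⟩⟩ <;> rfl

-- ===== VERDICT (by name: the statement is the Claim_ definition above) =====
theorem extract_test_name_spec : Claim_equal_extract_test_name := by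
  intro ip _
  unfold Spec_extract_test_name
  rw [portA_eq, portB_eq, afun_eq_bfun]
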